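-- pv_equiv track=rewrite | github.com/SauravSinha76/scaler2 | class56/MAX_and_MIN.py | nearest_greatest_right
-- ===== SOURCE A (Python) =====
-- def nearest_greatest_right(A):
--     n = len(A)
--     stack =[]
--     ans =[0] * n
--
--     for i in range(n-1,-1,-1):
--         while stack and A[stack[-1]] <= A[i]:
--             stack.pop()
--
--         if not stack:
--             ans[i] = n
--         else:
--             ans[i] = stack[-1]
--
--         stack.append(i)
--
--     return ans
-- ===== SOURCE B (Python) =====
-- def nearest_greatest_right(A):
--     n = len(A)
--     ans = [n] * n
--     stack = []
--     for i in range(n):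
--         while stack and A[i] > A[stack[-1]]:
--             ans[stack.pop()] = i
--         stack.append(i)
--     return ans
-- ===== Notes on version B (the rewrite author's own statement) =====
-- stated objective: alternative
-- what changed: Scans left-to-right resolving each answer at the moment its index is popped from the stack (ans preinitialized to the sentinel n), instead of A's right-to-left scan that reads the answer off the stack top after popping.
import Mathlib
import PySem

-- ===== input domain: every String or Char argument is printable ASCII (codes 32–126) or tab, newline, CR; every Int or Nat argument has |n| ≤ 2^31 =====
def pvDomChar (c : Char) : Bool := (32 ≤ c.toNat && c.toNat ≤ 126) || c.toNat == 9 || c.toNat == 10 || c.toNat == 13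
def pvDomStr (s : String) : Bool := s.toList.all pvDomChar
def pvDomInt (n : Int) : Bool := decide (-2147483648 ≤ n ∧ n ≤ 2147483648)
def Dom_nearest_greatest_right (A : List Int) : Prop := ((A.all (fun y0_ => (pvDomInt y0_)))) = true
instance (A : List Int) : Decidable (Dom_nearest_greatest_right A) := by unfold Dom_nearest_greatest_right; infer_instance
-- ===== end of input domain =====

-- B replaces A's right-to-left scan (answer read off the stack top) by a left-to-right scan that
-- assigns each answer when its index is popped (ans preinitialized to the sentinel n); same cost.

-- ===== PORT A =====
-- A's while loop 'while stack and A[stack[-1]] <= A[i]: stack.pop()'; stack head = Python stack[-1].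
-- All indices read are provably in range in A, so A.getD j 0 is exact for Python's A[j] here.
def popLe (A : List Int) (x : Int) : List Nat → List Nat
  | [] => []
  | j :: s => if A.getD j 0 ≤ x then popLe A x s else j :: s

-- one iteration of A's for-loop body at index i, state = (stack, ans)
def stepA (A : List Int) (st : List Nat × List Int) (i : Nat) : List Nat × List Int :=
  (i :: popLe A (A.getD i 0) st.1,
   st.2.set i (if (popLe A (A.getD i 0) st.1).isEmpty then (A.length : Int)
               else (((popLe A (A.getD i 0) st.1).headD 0 : Nat) : Int)))

-- for i in range(n-1,-1,-1): that range is (List.range n).reverse = [n-1, …, 0]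
def nearest_greatest_right (A : List Int) : List Int :=
  (((List.range A.length).reverse).foldl (stepA A) ([], List.replicate A.length (0 : Int))).2

-- ===== PORT B =====
-- B's while loop 'while stack and A[i] > A[stack[-1]]: ans[stack.pop()] = i'; returns (stack, ans).
def popAssign (A : List Int) (i : Nat) : List Nat → List Int → List Nat × List Int
  | [], ans => ([], ans)
  | j :: s, ans =>
    if A.getD i 0 > A.getD j 0 then popAssign A i s (ans.set j (i : Int))
    else (j :: s, ans)

-- one iteration of B's for-loop body at index i, then push i
def stepB (A : List Int) (st : List Nat × List Int) (i : Nat) : List Nat × List Int :=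
  let p := popAssign A i st.1 st.2
  (i :: p.1, p.2)

def nearest_greatest_right_alt (A : List Int) : List Int :=
  ((List.range A.length).foldl (stepB A) ([], List.replicate A.length (A.length : Int))).2

-- ===== PRECONDITION & SPEC =====
def Spec_nearest_greatest_right (A : List Int) (out : List Int) : Prop := out = nearest_greatest_right_alt A
instance (A : List Int) (out : List Int) : Decidable (Spec_nearest_greatest_right A out) := by unfold Spec_nearest_greatest_right; infer_instance

-- ===== CLAIM (what is proved, stated in full; the proofs are below) =====
def Claim_equal_nearest_greatest_right : Prop := ∀ (A : List Int), Dom_nearest_greatest_right A → Spec_nearest_greatest_right A (nearest_greatest_right A)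

-- ===== LEMMAS AND PROOFS =====

-- a m < a j for every m in [i, j)
def ngAllLt (A : List Int) (i j : Nat) : Bool :=
  (List.range' i (j - i)).all (fun m => decide (A.getD m 0 < A.getD j 0))

-- a m ≤ a j for every m in (j, i)
def ngAllLe (A : List Int) (j i : Nat) : Bool :=
  (List.range' (j+1) (i - (j+1))).all (fun m => decide (A.getD m 0 ≤ A.getD j 0))

-- A's stack right after processing index i (top = head, indices increase downward the list)
def visA (A : List Int) (i : Nat) : List Nat :=
  (List.range' i (A.length - i)).filter (fun j => ngAllLt A i j)

-- B's stack right after processing indices 0 .. i-1 (top = head, indices decrease down the list)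
def visB (A : List Int) (i : Nat) : List Nat :=
  ((List.range' 0 i).reverse).filter (fun j => ngAllLe A j i)

-- the common specification value: first index j > m with A[j] > A[m], else n
def fg (A : List Int) (m : Nat) : Int :=
  match (List.range' (m+1) (A.length - (m+1))).find? (fun j => decide (A.getD m 0 < A.getD j 0)) with
  | some j => (j : Int)
  | none => (A.length : Int)

lemma ngAllLt_iff (A : List Int) (i j : Nat) :
    ngAllLt A i j = true ↔ ∀ m, i ≤ m → m < j → A.getD m 0 < A.getD j 0 := by
  unfold ngAllLt
  simp only [List.all_eq_true, List.mem_range'_1, decide_eq_true_eq]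
  constructor
  · intro h m h1 h2; exact h m ⟨h1, by omega⟩
  · intro h m hm; exact h m hm.1 (by omega)

lemma ngAllLe_iff (A : List Int) (j i : Nat) :
    ngAllLe A j i = true ↔ ∀ m, j < m → m < i → A.getD m 0 ≤ A.getD j 0 := by
  unfold ngAllLe
  simp only [List.all_eq_true, List.mem_range'_1, decide_eq_true_eq]
  constructor
  · intro h m h1 h2; exact h m ⟨by omega, by omega⟩
  · intro h m hm; exact h m (by omega) (by omega)

lemma ngAllLt_self (A : List Int) (i : Nat) : ngAllLt A i i = true := by
  unfold ngAllLt; simp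

lemma ngAllLe_self (A : List Int) (i : Nat) : ngAllLe A i (i+1) = true := by
  unfold ngAllLe; simp

lemma ngAllLt_succ (A : List Int) (i j : Nat) (h : i < j) :
    ngAllLt A i j = (decide (A.getD i 0 < A.getD j 0) && ngAllLt A (i+1) j) := by
  unfold ngAllLt
  have h1 : j - i = (j - (i+1)) + 1 := by omega
  rw [h1, List.range'_succ, List.all_cons]

lemma ngAllLe_succ (A : List Int) (j i : Nat) (h : j < i) :
    ngAllLe A j (i+1) = (ngAllLe A j i && decide (A.getD i 0 ≤ A.getD j 0)) := by
  unfold ngAllLe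
  have h1 : i + 1 - (j+1) = (i - (j+1)) + 1 := by omega
  rw [h1, List.range'_concat, List.all_append]
  have h2 : j + 1 + 1 * (i - (j + 1)) = i := by omega
  rw [h2]; simp

-- ===== A side =====

lemma popA_filter (A : List Int) (x : Int) (I : Nat) :
    ∀ (c s : Nat), I ≤ s →
      popLe A x ((List.range' s c).filter (fun j => ngAllLt A I j)) =
        (List.range' s c).filter (fun j => ngAllLt A I j && decide (x < A.getD j 0)) := by
  intro c
  induction c with
  | zero => intro s _; simp [popLe]
  | succ c ih =>
    intro s hs
    have hs1 : I ≤ s + 1 := by omega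
    rw [List.range'_succ]
    by_cases hp : ngAllLt A I s = true
    · by_cases hx : A.getD s 0 ≤ x
      · have hd : decide (x < A.getD s 0) = false := decide_eq_false (by omega)
        rw [List.filter_cons_of_pos (by rw [hp]), List.filter_cons_of_neg (by rw [hp, hd]; simp)]
        simp only [popLe]
        rw [if_pos hx]
        exact ih (s+1) hs1
      · have hd : decide (x < A.getD s 0) = true := decide_eq_true (by omega)
        rw [List.filter_cons_of_pos (by rw [hp]), List.filter_cons_of_pos (by rw [hp, hd]; rfl)]
        simp only [popLe]
        rw [if_neg hx]
        congr 1
        refine List.filter_congr ?_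
        intro j hj
        rcases List.mem_range'_1.mp hj with ⟨h1, h2⟩
        by_cases hq : ngAllLt A I j = true
        · have hsj : A.getD s 0 < A.getD j 0 := (ngAllLt_iff A I j).mp hq s hs (by omega)
          rw [hq, decide_eq_true (show x < A.getD j 0 by omega)]; rfl
        · simp only [Bool.not_eq_true] at hq
          rw [hq]; rfl
    · simp only [Bool.not_eq_true] at hp
      rw [List.filter_cons_of_neg (by rw [hp]; simp), List.filter_cons_of_neg (by rw [hp]; simp)]
      exact ih (s+1) hs1

lemma visA_step (A : List Int) (i : Nat) (h : i < A.length) :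
    visA A i = i :: popLe A (A.getD i 0) (visA A (i+1)) := by
  unfold visA
  have h1 : A.length - i = (A.length - (i+1)) + 1 := by omega
  rw [h1, List.range'_succ, List.filter_cons_of_pos (by rw [ngAllLt_self])]
  congr 1
  rw [popA_filter A (A.getD i 0) (i+1) (A.length - (i+1)) (i+1) (le_refl _)]
  refine List.filter_congr ?_
  intro j hj
  rcases List.mem_range'_1.mp hj with ⟨h2, h3⟩
  rw [ngAllLt_succ A i j (by omega)]
  rw [Bool.and_comm]

lemma ansA_val (A : List Int) (x : Int) (I : Nat) :
    ∀ (c s : Nat), I ≤ s → (∀ m, I ≤ m → m < s → A.getD m 0 ≤ x) →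
      (if ((List.range' s c).filter (fun j => ngAllLt A I j && decide (x < A.getD j 0))).isEmpty
         then (A.length : Int)
         else ((((List.range' s c).filter (fun j => ngAllLt A I j && decide (x < A.getD j 0))).headD 0 : Nat) : Int)) =
      (match (List.range' s c).find? (fun j => decide (x < A.getD j 0)) with
       | some j => ((j : Nat) : Int)
       | none => (A.length : Int)) := by
  intro c
  induction c with
  | zero => intro s _ _; simp
  | succ c ih =>
    intro s hs hinv
    rw [List.range'_succ]
    by_cases hx : x < A.getD s 0
    · have hd : decide (x < A.getD s 0) = true := decide_eq_true hx
      have hall : ngAllLt A I s = true := by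
        rw [ngAllLt_iff]
        intro m h1 h2
        have := hinv m h1 h2
        omega
      rw [List.filter_cons_of_pos (by rw [hall, hd]; rfl), List.find?_cons_of_pos (p := fun j => decide (x < A.getD j 0)) hd]
      simp
    · have hd : decide (x < A.getD s 0) = false := decide_eq_false hx
      rw [List.filter_cons_of_neg (by rw [hd]; simp), List.find?_cons_of_neg (p := fun j => decide (x < A.getD j 0)) (by show ¬ decide (x < A.getD s 0) = true; rw [hd]; simp)]
      refine ih (s+1) (by omega) ?_
      intro m h1 h2
      by_cases hms : m < s
      · exact hinv m h1 hms
      · have : m = s := by omega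
        subst this; omega

lemma foldA (A : List Int) : ∀ k, k ≤ A.length →
    ((List.range' (A.length - k) k).reverse).foldl (stepA A) ([], List.replicate A.length (0 : Int)) =
      (visA A (A.length - k),
       (List.range A.length).map (fun j => if A.length - k ≤ j then fg A j else 0)) := by
  intro k
  induction k with
  | zero =>
    intro _
    rw [List.range'_zero, List.reverse_nil, List.foldl_nil, Prod.mk.injEq]
    constructor
    · unfold visA; rw [Nat.sub_zero, Nat.sub_self, List.range'_zero, List.filter_nil]
    · apply List.ext_getElem?
      intro m
      by_cases hm : m < A.length
      · rw [List.getElem?_eq_getElem (by simpa), List.getElem?_eq_getElem (by simpa)]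
        rw [List.getElem_replicate, List.getElem_map, List.getElem_range]
        rw [if_neg (by omega)]
      · rw [List.getElem?_eq_none (by simpa using hm), List.getElem?_eq_none (by simpa using hm)]
  | succ k ih =>
    intro hk
    have hi : A.length - (k+1) < A.length := by omega
    have h1 : A.length - k = (A.length - (k+1)) + 1 := by omega
    have h2 : List.range' (A.length - (k+1)) (k+1) =
        (A.length - (k+1)) :: List.range' (A.length - k) k := by
      rw [List.range'_succ, ← h1]
    rw [h2, List.reverse_cons, List.foldl_append, ih (by omega), List.foldl_cons, List.foldl_nil]
    unfold stepA
    have hpop : popLe A (A.getD (A.length - (k+1)) 0) (visA A (A.length - k)) =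
        (List.range' (A.length - k) (A.length - (A.length - k))).filter
          (fun j => ngAllLt A (A.length - k) j && decide (A.getD (A.length - (k+1)) 0 < A.getD j 0)) := by
      unfold visA
      exact popA_filter A _ (A.length - k) _ (A.length - k) le_rfl
    have hval : (if ((List.range' (A.length - k) (A.length - (A.length - k))).filter
          (fun j => ngAllLt A (A.length - k) j && decide (A.getD (A.length - (k+1)) 0 < A.getD j 0))).isEmpty
        then (A.length : Int)
        else ((((List.range' (A.length - k) (A.length - (A.length - k))).filter
          (fun j => ngAllLt A (A.length - k) j && decide (A.getD (A.length - (k+1)) 0 < A.getD j 0))).headD 0 : Nat) : Int))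
        = fg A (A.length - (k+1)) := by
      rw [ansA_val A _ (A.length - k) _ (A.length - k) le_rfl (by intro m hm1 hm2; omega)]
      unfold fg
      rw [← h1]
    rw [Prod.mk.injEq]
    constructor
    · show (A.length - (k+1)) :: popLe A (A.getD (A.length - (k+1)) 0) (visA A (A.length - k)) = _
      rw [h1, ← visA_step A (A.length - (k+1)) hi]
    · show (List.map _ (List.range A.length)).set (A.length - (k+1)) _ = _
      rw [hpop, hval]
      apply List.ext_getElem?
      intro m
      rw [List.getElem?_set]
      by_cases hm : m < A.length
      · by_cases he : A.length - (k+1) = m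
        · rw [if_pos he, if_pos (by simp only [List.length_map, List.length_range]; omega),
              List.getElem?_eq_getElem (by simpa)]
          rw [List.getElem_map, List.getElem_range, ← he, if_pos (by omega)]
        · rw [if_neg he, List.getElem?_eq_getElem (by simpa), List.getElem?_eq_getElem (by simpa)]
          rw [List.getElem_map, List.getElem_range, List.getElem_map, List.getElem_range]
          by_cases hc : A.length - k ≤ m
          · rw [if_pos hc, if_pos (by omega)]
          · rw [if_neg hc, if_neg (by omega)]
      · rw [if_neg (by omega), List.getElem?_eq_none (by simpa using hm),
           List.getElem?_eq_none (by simpa using hm)]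

lemma portA_spec (A : List Int) : nearest_greatest_right A = (List.range A.length).map (fg A) := by
  unfold nearest_greatest_right
  have h := foldA A A.length le_rfl
  rw [Nat.sub_self] at h
  rw [List.range_eq_range'] at h ⊢
  rw [h]
  refine List.map_congr_left ?_
  intro j hj
  rw [if_pos (Nat.zero_le j)]

-- ===== B side =====

lemma popAssign_eq (A : List Int) (i : Nat) :
    ∀ (s : List Nat) (ans : List Int),
      popAssign A i s ans =
        (s.dropWhile (fun j => decide (A.getD j 0 < A.getD i 0)),
         (s.takeWhile (fun j => decide (A.getD j 0 < A.getD i 0))).foldl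
           (fun an j => an.set j (i : Int)) ans) := by
  intro s
  induction s with
  | nil => intro ans; simp [popAssign]
  | cons j t ih =>
    intro ans
    by_cases hj : A.getD j 0 < A.getD i 0
    · have hd : decide (A.getD j 0 < A.getD i 0) = true := decide_eq_true hj
      rw [List.dropWhile_cons, List.takeWhile_cons, hd]
      simp only [popAssign]
      rw [if_pos (show A.getD i 0 > A.getD j 0 from hj), ih]
      simp
    · have hd : decide (A.getD j 0 < A.getD i 0) = false := decide_eq_false hj
      rw [List.dropWhile_cons, List.takeWhile_cons, hd]
      simp only [popAssign]
      rw [if_neg (show ¬ A.getD i 0 > A.getD j 0 from hj)]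
      simp

lemma dropB_aux (A : List Int) (i : Nat) :
    ∀ c, c ≤ i →
      (((List.range' 0 c).reverse).filter (fun j => ngAllLe A j i)).dropWhile
          (fun j => decide (A.getD j 0 < A.getD i 0)) =
        ((List.range' 0 c).reverse).filter (fun j => ngAllLe A j i && decide (A.getD i 0 ≤ A.getD j 0)) := by
  intro c
  induction c with
  | zero => intro _; simp
  | succ c ih =>
    intro hc
    have hrev : (List.range' 0 (c+1)).reverse = c :: (List.range' 0 c).reverse := by
      rw [List.range'_concat, List.reverse_append]
      simp
    rw [hrev]
    by_cases hp : ngAllLe A c i = true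
    · by_cases hlt : A.getD c 0 < A.getD i 0
      · have hd : decide (A.getD c 0 < A.getD i 0) = true := decide_eq_true hlt
        have hd2 : decide (A.getD i 0 ≤ A.getD c 0) = false := decide_eq_false (by omega)
        rw [List.filter_cons_of_pos (by rw [hp]), List.filter_cons_of_neg (by rw [hp, hd2]; simp)]
        rw [List.dropWhile_cons, hd]
        rw [ih (by omega)]
        simp
      · have hd : decide (A.getD c 0 < A.getD i 0) = false := decide_eq_false hlt
        have hd2 : decide (A.getD i 0 ≤ A.getD c 0) = true := decide_eq_true (by omega)
        rw [List.filter_cons_of_pos (by rw [hp]), List.filter_cons_of_pos (by rw [hp, hd2]; rfl)]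
        rw [List.dropWhile_cons, hd]
        simp only [Bool.false_eq_true, ite_false]
        congr 1
        refine List.filter_congr ?_
        intro j hj
        have hjc : j < c := by
          have := List.mem_range'_1.mp (List.mem_reverse.mp hj)
          omega
        by_cases hq : ngAllLe A j i = true
        · have : A.getD c 0 ≤ A.getD j 0 := (ngAllLe_iff A j i).mp hq c hjc (by omega)
          rw [hq, decide_eq_true (show A.getD i 0 ≤ A.getD j 0 by omega)]; rfl
        · simp only [Bool.not_eq_true] at hq
          rw [hq]; rfl
    · simp only [Bool.not_eq_true] at hp
      rw [List.filter_cons_of_neg (by rw [hp]; simp), List.filter_cons_of_neg (by rw [hp]; simp)]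
      exact ih (by omega)

lemma takeB_aux (A : List Int) (i : Nat) :
    ∀ c, c ≤ i →
      (((List.range' 0 c).reverse).filter (fun j => ngAllLe A j i)).takeWhile
          (fun j => decide (A.getD j 0 < A.getD i 0)) =
        ((List.range' 0 c).reverse).filter (fun j => ngAllLe A j i && decide (A.getD j 0 < A.getD i 0)) := by
  intro c
  induction c with
  | zero => intro _; simp
  | succ c ih =>
    intro hc
    have hrev : (List.range' 0 (c+1)).reverse = c :: (List.range' 0 c).reverse := by
      rw [List.range'_concat, List.reverse_append]
      simp
    rw [hrev]
    by_cases hp : ngAllLe A c i = true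
    · by_cases hlt : A.getD c 0 < A.getD i 0
      · have hd : decide (A.getD c 0 < A.getD i 0) = true := decide_eq_true hlt
        rw [List.filter_cons_of_pos (by rw [hp]), List.filter_cons_of_pos (by rw [hp, hd]; rfl)]
        rw [List.takeWhile_cons, hd]
        rw [ih (by omega)]
        simp
      · have hd : decide (A.getD c 0 < A.getD i 0) = false := decide_eq_false hlt
        rw [List.filter_cons_of_pos (by rw [hp]), List.filter_cons_of_neg (by rw [hp, hd]; simp)]
        rw [List.takeWhile_cons, hd]
        simp only [Bool.false_eq_true, ite_false]
        symm
        rw [List.filter_eq_nil_iff]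
        intro j hj
        have hjc : j < c := by
          have := List.mem_range'_1.mp (List.mem_reverse.mp hj)
          omega
        by_cases hq : ngAllLe A j i = true
        · have : A.getD c 0 ≤ A.getD j 0 := (ngAllLe_iff A j i).mp hq c hjc (by omega)
          rw [hq, decide_eq_false (show ¬ A.getD j 0 < A.getD i 0 by omega)]
          simp
        · simp only [Bool.not_eq_true] at hq
          rw [hq]
          simp
    · simp only [Bool.not_eq_true] at hp
      rw [List.filter_cons_of_neg (by rw [hp]; simp), List.filter_cons_of_neg (by rw [hp]; simp)]
      exact ih (by omega)

lemma visB_step (A : List Int) (i : Nat) :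
    visB A (i+1) = i :: (visB A i).dropWhile (fun j => decide (A.getD j 0 < A.getD i 0)) := by
  unfold visB
  have hrev : (List.range' 0 (i+1)).reverse = i :: (List.range' 0 i).reverse := by
    rw [List.range'_concat, List.reverse_append]
    simp
  rw [hrev, List.filter_cons_of_pos (by rw [ngAllLe_self])]
  congr 1
  rw [dropB_aux A i i le_rfl]
  refine List.filter_congr ?_
  intro j hj
  have hjc : j < i := by
    have := List.mem_range'_1.mp (List.mem_reverse.mp hj)
    omega
  rw [ngAllLe_succ A j i hjc]

lemma foldl_set_getElem? (v : Int) :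
    ∀ (l : List Nat) (ans : List Int) (m : Nat),
      (l.foldl (fun an j => an.set j v) ans)[m]? =
        if m ∈ l then (if m < ans.length then some v else none) else ans[m]? := by
  intro l
  induction l with
  | nil => intro ans m; simp
  | cons j t ih =>
    intro ans m
    rw [List.foldl_cons, ih, List.length_set]
    by_cases hmt : m ∈ t
    · rw [if_pos hmt, if_pos (List.mem_cons_of_mem j hmt)]
    · rw [if_neg hmt, List.getElem?_set]
      by_cases hjm : j = m
      · subst hjm
        simp
      · rw [if_neg hjm, if_neg (by simp [hmt]; omega)]

lemma fg_eq_of (A : List Int) (m i : Nat) (hm : m < i) (hi : i < A.length)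
    (hLe : ngAllLe A m i = true) (hlt : A.getD m 0 < A.getD i 0) : fg A m = (i : Int) := by
  unfold fg
  have hsplit : List.range' (m+1) (A.length - (m+1)) =
      List.range' (m+1) (i - (m+1)) ++ List.range' i (A.length - i) := by
    have h1 : m + 1 + 1 * (i - (m+1)) = i := by omega
    have h2 : i - (m+1) + (A.length - i) = A.length - (m+1) := by omega
    rw [← h2, ← List.range'_append, h1]
  rw [hsplit, List.find?_append]
  have hnone : (List.range' (m+1) (i - (m+1))).find?
      (fun j => decide (A.getD m 0 < A.getD j 0)) = none := by
    rw [List.find?_eq_none]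
    intro j hj
    rcases List.mem_range'_1.mp hj with ⟨h1, h2⟩
    have : A.getD j 0 ≤ A.getD m 0 := (ngAllLe_iff A m i).mp hLe j (by omega) (by omega)
    simp only [decide_eq_true_eq]
    omega
  rw [hnone, Option.none_or]
  have h3 : A.length - i = (A.length - (i+1)) + 1 := by omega
  rw [h3, List.range'_succ,
      List.find?_cons_of_pos (p := fun j => decide (A.getD m 0 < A.getD j 0)) (decide_eq_true hlt)]

lemma fg_none (A : List Int) (m : Nat) (hm : m < A.length)
    (hLe : ngAllLe A m A.length = true) : fg A m = (A.length : Int) := by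
  unfold fg
  have hnone : (List.range' (m+1) (A.length - (m+1))).find?
      (fun j => decide (A.getD m 0 < A.getD j 0)) = none := by
    rw [List.find?_eq_none]
    intro j hj
    rcases List.mem_range'_1.mp hj with ⟨h1, h2⟩
    have : A.getD j 0 ≤ A.getD m 0 := (ngAllLe_iff A m A.length).mp hLe j (by omega) (by omega)
    simp only [decide_eq_true_eq]
    omega
  rw [hnone]

lemma foldB (A : List Int) : ∀ i, i ≤ A.length →
    (List.range i).foldl (stepB A) ([], List.replicate A.length (A.length : Int)) =
      (visB A i,
       (List.range A.length).map
         (fun j => if decide (j < i) && !(ngAllLe A j i) then fg A j else (A.length : Int))) := by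
  intro i
  induction i with
  | zero =>
    intro _
    rw [List.range_zero, List.foldl_nil, Prod.mk.injEq]
    constructor
    · unfold visB; rw [List.range'_zero]; rfl
    · apply List.ext_getElem?
      intro m
      by_cases hm : m < A.length
      · rw [List.getElem?_eq_getElem (by simpa), List.getElem?_eq_getElem (by simpa)]
        rw [List.getElem_replicate, List.getElem_map, List.getElem_range]
        rw [decide_eq_false (show ¬ m < 0 by omega)]
        rfl
      · rw [List.getElem?_eq_none (by simpa using hm), List.getElem?_eq_none (by simpa using hm)]
  | succ i ih =>
    intro hi
    rw [List.range_succ, List.foldl_append, ih (by omega), List.foldl_cons, List.foldl_nil]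
    unfold stepB
    rw [popAssign_eq]
    rw [Prod.mk.injEq]
    constructor
    · show i :: (visB A i).dropWhile _ = visB A (i+1)
      rw [← visB_step A i]
    · show ((visB A i).takeWhile _).foldl _ (List.map _ (List.range A.length)) = _
      have htake : (visB A i).takeWhile (fun j => decide (A.getD j 0 < A.getD i 0)) =
          ((List.range' 0 i).reverse).filter
            (fun j => ngAllLe A j i && decide (A.getD j 0 < A.getD i 0)) := takeB_aux A i i le_rfl
      rw [htake]
      apply List.ext_getElem?
      intro m
      rw [foldl_set_getElem?]
      by_cases hm : m < A.length
      · rw [List.getElem?_eq_getElem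
            (show m < (List.map (fun j => if decide (j < i+1) && !(ngAllLe A j (i+1)) then fg A j
              else (A.length : Int)) (List.range A.length)).length by simpa)]
        rw [List.getElem_map, List.getElem_range]
        by_cases hmem : m ∈ ((List.range' 0 i).reverse).filter
            (fun j => ngAllLe A j i && decide (A.getD j 0 < A.getD i 0))
        · rcases List.mem_filter.mp hmem with ⟨hmem', hcond⟩
          have hmi : m < i := by
            have := List.mem_range'_1.mp (List.mem_reverse.mp hmem')
            omega
          rw [Bool.and_eq_true] at hcond
          rcases hcond with ⟨hLe, hdec⟩
          have hlt : A.getD m 0 < A.getD i 0 := of_decide_eq_true hdec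
          rw [if_pos hmem, if_pos (by simp only [List.length_map, List.length_range]; omega)]
          have hsq : ngAllLe A m (i+1) = false := by
            rw [ngAllLe_succ A m i hmi, hLe, decide_eq_false (show ¬ A.getD i 0 ≤ A.getD m 0 by omega)]
            rfl
          rw [hsq, decide_eq_true (show m < i + 1 by omega)]
          rw [fg_eq_of A m i hmi (by omega) hLe hlt]
          simp
        · rw [if_neg hmem, List.getElem?_eq_getElem (by simpa), List.getElem_map, List.getElem_range]
          congr 1
          by_cases hmi : m < i
          · have hmem' : m ∈ (List.range' 0 i).reverse :=
              List.mem_reverse.mpr (List.mem_range'_1.mpr ⟨Nat.zero_le m, by omega⟩)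
            by_cases hq : ngAllLe A m i = true
            · have hge : A.getD i 0 ≤ A.getD m 0 := by
                by_contra hcon
                exact hmem (List.mem_filter.mpr
                  ⟨hmem', by rw [hq, decide_eq_true (show A.getD m 0 < A.getD i 0 by omega)]; rfl⟩)
              have hsq : ngAllLe A m (i+1) = true := by
                rw [ngAllLe_succ A m i hmi, hq, decide_eq_true hge]; rfl
              rw [hq, hsq]
              simp
            · have hq' : ngAllLe A m i = false := by simpa using hq
              have hsq : ngAllLe A m (i+1) = false := by
                rw [ngAllLe_succ A m i hmi, hq']; rfl
              rw [hq', hsq, decide_eq_true (show m < i by omega),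
                  decide_eq_true (show m < i + 1 by omega)]
          · by_cases hei : m = i
            · subst hei
              rw [decide_eq_false (show ¬ m < m by omega), ngAllLe_self, decide_eq_true (show m < m + 1 by omega)]
              rfl
            · rw [decide_eq_false (show ¬ m < i by omega), decide_eq_false (show ¬ m < i + 1 by omega)]
              simp
      · rw [if_neg (fun hmem => by
              have := List.mem_range'_1.mp (List.mem_reverse.mp (List.mem_filter.mp hmem).1)
              omega),
            List.getElem?_eq_none (by simpa using hm), List.getElem?_eq_none (by simpa using hm)]

lemma portB_spec (A : List Int) : nearest_greatest_right_alt A = (List.range A.length).map (fg A) := by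
  unfold nearest_greatest_right_alt
  rw [foldB A A.length le_rfl]
  show List.map _ (List.range A.length) = _
  refine List.map_congr_left ?_
  intro j hj
  have hjn : j < A.length := List.mem_range.mp hj
  by_cases hq : ngAllLe A j A.length = true
  · rw [hq, fg_none A j hjn hq]
    simp
  · have hq' : ngAllLe A j A.length = false := by simpa using hq
    rw [hq', decide_eq_true hjn]
    rfl

-- ===== VERDICT (by name: the statement is the Claim_ definition above) =====
theorem nearest_greatest_right_spec : Claim_equal_nearest_greatest_right := by
  intro A _
  unfold Spec_nearest_greatest_right
  rw [portA_spec, portB_spec]
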